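-- pv_equiv track=rewrite | github.com/VidMegushar/AOC_2015 | day11.py | has_pairs
-- ===== SOURCE A (Python) =====
-- def has_pairs(password):
--     i = 0
--     num_pairs = 0
--     while i < len(password) - 1:
--         if password[i] == password[i + 1]:
--             num_pairs += 1
--             i += 2
--         else:
--             i += 1
--     return num_pairs >= 2
-- ===== SOURCE B (Python) =====
-- def split_run(s):
--     """For nonempty s: (length of the initial run of equal chars, the remainder)."""
--     head = s[0]
--     i = 1
--     while i < len(s) and s[i] == head:
--         i += 1
--     return i, s[i:]
--
-- def run_lengths(s):
--     lengths = []
--     while s: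
--         n, s = split_run(s)
--         lengths.append(n)
--     return lengths
--
-- def has_pairs(password):
--     return sum(n // 2 for n in run_lengths(password)) >= 2
-- ===== Notes on version B (the rewrite author's own statement) =====
-- stated objective: alternative
-- what changed: B run-length-encodes the string (staged pass producing the list of run lengths) and decides by arithmetic, sum of n//2 over runs >= 2, instead of A's greedy index scan that counts pairs and skips 2 past each match.
import Mathlib
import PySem

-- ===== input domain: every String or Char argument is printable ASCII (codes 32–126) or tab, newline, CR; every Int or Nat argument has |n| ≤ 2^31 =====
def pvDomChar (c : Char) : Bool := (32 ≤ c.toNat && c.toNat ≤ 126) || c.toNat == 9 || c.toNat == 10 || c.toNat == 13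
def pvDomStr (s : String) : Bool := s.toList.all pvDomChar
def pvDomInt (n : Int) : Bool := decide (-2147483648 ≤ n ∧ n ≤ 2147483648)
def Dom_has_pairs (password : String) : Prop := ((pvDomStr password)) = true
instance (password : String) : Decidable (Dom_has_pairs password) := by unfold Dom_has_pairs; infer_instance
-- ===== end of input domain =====

-- B replaces A's greedy pair-counting index scan by run-length encoding the string and summing n//2 over the runs (alternative algorithm, same cost).


-- ===== PORT A =====
-- while i < len(password) - 1: …  (i, num_pairs carried; i advances by 2 past a pair, else by 1)
def hasPairsGoA (s : List Char) (i np : Int) : Int :=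
  if _h : i < (s.length : Int) - 1 then
    if PySem.List.pyGet? s i = PySem.List.pyGet? s (i + 1) then
      hasPairsGoA s (i + 2) (np + 1)
    else
      hasPairsGoA s (i + 1) np
  else np
termination_by ((s.length : Int) - i).toNat
decreasing_by all_goals omega

def has_pairs (password : String) : Bool :=
  hasPairsGoA password.toList 0 0 ≥ 2

-- ===== PORT B =====
-- split_run's inner while: count how many further chars equal the head
def countLead (c : Char) : List Char → Nat
  | [] => 0
  | x :: xs => if x = c then countLead c xs + 1 else 0

-- run_lengths: repeatedly split off the initial run, collecting its length
def runLengths : List Char → List Int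
  | [] => []
  | c :: rest =>
      let k := countLead c rest
      ((1 + k : Nat) : Int) :: runLengths (rest.drop k)
termination_by s => s.length
decreasing_by simp

-- sum(n // 2 for n in run_lengths(password)) >= 2
def has_pairs_alt (password : String) : Bool :=
  ((runLengths password.toList).map (fun n => PySem.Int.floordiv n 2)).sum ≥ 2

-- ===== PRECONDITION & SPEC =====
def Spec_has_pairs (password : String) (out : Bool) : Prop := out = has_pairs_alt password
instance (password : String) (out : Bool) : Decidable (Spec_has_pairs password out) := by unfold Spec_has_pairs; infer_instance

-- ===== CLAIM (what is proved, stated in full; the proofs are below) =====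
def Claim_equal_has_pairs : Prop := ∀ (password : String), Dom_has_pairs password → Spec_has_pairs password (has_pairs password)

-- ===== LEMMAS AND PROOFS =====

-- structural restatement of A's greedy scan (suffix view)
def greedy : List Char → Int
  | a :: b :: rest => if a = b then 1 + greedy rest else greedy (b :: rest)
  | _ => 0

theorem greedy_short (t : List Char) (h : t.length ≤ 1) : greedy t = 0 := by
  match t, h with
  | [], _ => rfl
  | [a], _ => rfl

-- A's loop from natural index n equals np + greedy of the suffix
theorem hasPairsGoA_eq_greedy (s : List Char) (n : Nat) (np : Int) :
    hasPairsGoA s (n : Int) np = np + greedy (s.drop n) := by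
  rw [hasPairsGoA]
  split
  · rename_i h
    have hn1 : n + 1 < s.length := by omega
    have hn : n < s.length := by omega
    have hd : s.drop n = s[n] :: s.drop (n + 1) := List.drop_eq_getElem_cons hn
    have hd1 : s.drop (n + 1) = s[n + 1] :: s.drop (n + 2) := List.drop_eq_getElem_cons hn1
    have hg0 : PySem.List.pyGet? s (n : Int) = some s[n] := by
      simp [PySem.List.pyGet?_natCast, List.getElem?_eq_getElem hn]
    have hg1 : PySem.List.pyGet? s ((n : Int) + 1) = some s[n + 1] := by
      have e : ((n : Int) + 1) = ((n + 1 : Nat) : Int) := by push_cast; ring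
      rw [e, PySem.List.pyGet?_natCast, List.getElem?_eq_getElem hn1]
    rw [hg0, hg1]
    split
    · rename_i heq
      have hc : s[n] = s[n + 1] := by simpa using heq
      have : ((n : Int) + 2) = ((n + 2 : Nat) : Int) := by push_cast; ring
      rw [this, hasPairsGoA_eq_greedy s (n + 2) (np + 1)]
      rw [hd, hd1, greedy]
      simp [hc]
      ring
    · rename_i hne
      have hc : s[n] ≠ s[n + 1] := by simpa using hne
      have : ((n : Int) + 1) = ((n + 1 : Nat) : Int) := by push_cast; ring
      rw [this, hasPairsGoA_eq_greedy s (n + 1) np]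
      rw [hd, hd1, greedy]
      simp [hc]
  · rename_i h
    have : (s.drop n).length ≤ 1 := by simp; omega
    rw [greedy_short _ this]; ring
termination_by (s.length - n)
decreasing_by all_goals omega

-- the prefix of a list described by countLead is a replicate, and the remainder starts differently
theorem countLead_split (c : Char) (l : List Char) :
    List.replicate (countLead c l) c ++ l.drop (countLead c l) = l ∧
    ∀ d, (l.drop (countLead c l)).head? = some d → d ≠ c := by
  induction l with
  | nil => simp [countLead]
  | cons x xs ih =>
      by_cases hx : x = c
      · simp only [countLead, if_pos hx, List.replicate_succ]
        subst hx
        constructor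
        · simpa using ih.1
        · simpa using ih.2
      · simp [countLead, hx]

-- greedy over a run of m equal chars followed by a differently-headed tail
theorem greedy_replicate (m : Nat) (c : Char) (t : List Char)
    (ht : ∀ d, t.head? = some d → d ≠ c) :
    greedy (List.replicate m c ++ t) = ((m / 2 : Nat) : Int) + greedy t := by
  match m with
  | 0 => simp
  | 1 =>
      cases t with
      | nil => simp [greedy]
      | cons b t' =>
          have hb : b ≠ c := ht b (by simp)
          have e : List.replicate 1 c ++ b :: t' = c :: b :: t' := by simp
          rw [e, greedy, if_neg (Ne.symm hb)]
          simp
  | (m' + 2) =>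
      have : List.replicate (m' + 2) c ++ t = c :: c :: (List.replicate m' c ++ t) := by
        simp [List.replicate_succ]
      rw [this, greedy]
      rw [greedy_replicate m' c t ht]
      have : (m' + 2) / 2 = m' / 2 + 1 := by omega
      rw [this]
      push_cast
      simp
      ring

-- greedy equals the sum of n // 2 over the run lengths
theorem greedy_eq_sum (s : List Char) :
    greedy s = ((runLengths s).map (fun n => PySem.Int.floordiv n 2)).sum := by
  match s with
  | [] => simp [runLengths, greedy]
  | c :: rest =>
      have hk := countLead_split c rest
      set k := countLead c rest with hkdef
      have hrl : runLengths (c :: rest) =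
          ((1 + k : Nat) : Int) :: runLengths (rest.drop k) := by
        rw [runLengths.eq_def]
      have hsplit : c :: rest = List.replicate (1 + k) c ++ rest.drop k := by
        rw [show 1 + k = k + 1 from by omega, List.replicate_succ, List.cons_append, hk.1]
      have hhead : ∀ d, (rest.drop k).head? = some d → d ≠ c := hk.2
      have hfd : PySem.Int.floordiv ((1 + k : Nat) : Int) 2 = (((1 + k) / 2 : Nat) : Int) := by
        exact_mod_cast PySem.Int.floordiv_natCast (1 + k) 2
      rw [hrl, List.map_cons, List.sum_cons, hfd, ← greedy_eq_sum (rest.drop k)]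
      conv_lhs => rw [hsplit]
      rw [greedy_replicate (1 + k) c _ hhead]
termination_by s.length
decreasing_by
  simp

-- ===== VERDICT (by name: the statement is the Claim_ definition above) =====
theorem has_pairs_spec : Claim_equal_has_pairs := by
  intro password _
  unfold Spec_has_pairs has_pairs has_pairs_alt
  have h0 : (0 : Int) = ((0 : Nat) : Int) := rfl
  rw [h0, hasPairsGoA_eq_greedy, List.drop_zero, greedy_eq_sum]
  simp
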